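-- pv_equiv track=rewrite | github.com/leesh3288/CTF | 2020/20CyberOC/Qual/solution/emptyfile/disasm.py | c2v
-- ===== SOURCE A (Python) =====
-- def c2v(code, st):
--     cur = 0
--     val = 0
--     while st + cur < len(code):
--         if code[st + cur] == '\t':
--             val = val * 2 + 1
--         elif code[st + cur] == ' ':
--             val = val * 2
--         else:
--             break
--         cur += 1
--     return val, st + cur + 1
-- ===== SOURCE B (Python) =====
-- def c2v(code, st):
--     tail = code[st:]
--     run = len(tail) - len(tail.lstrip(' \t'))
--     bits = tail[:run].replace('\t', '1').replace(' ', '0')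
--     return (int(bits, 2) if bits else 0, st + run + 1)
-- ===== Notes on version B (the rewrite author's own statement) =====
-- stated objective: simpler
-- what changed: Replaces A's accumulate-as-you-scan while loop by a two-phase decomposition: the span of the tab/space run is found with slicing and lstrip(' \t'), then the value is decoded in one shot by translating '\t'/' ' to '1'/'0' and calling int(bits, 2).
-- intended difference: When st is negative, the last |st| characters of code are all spaces/tabs and the first character of code is a space/tab, A's negative indexing wraps past the end of the string and keeps accumulating bits from the START of code (e.g. c2v(' ', -1) == (0, 2)), while B parses only the run inside code[st:] and returns (0, 1) there — the intended 'parse the bit run starting at st' result. — e.g. on c2v(" ", -1): A returns (0, 2), B returns (0, 1)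
import Mathlib
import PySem

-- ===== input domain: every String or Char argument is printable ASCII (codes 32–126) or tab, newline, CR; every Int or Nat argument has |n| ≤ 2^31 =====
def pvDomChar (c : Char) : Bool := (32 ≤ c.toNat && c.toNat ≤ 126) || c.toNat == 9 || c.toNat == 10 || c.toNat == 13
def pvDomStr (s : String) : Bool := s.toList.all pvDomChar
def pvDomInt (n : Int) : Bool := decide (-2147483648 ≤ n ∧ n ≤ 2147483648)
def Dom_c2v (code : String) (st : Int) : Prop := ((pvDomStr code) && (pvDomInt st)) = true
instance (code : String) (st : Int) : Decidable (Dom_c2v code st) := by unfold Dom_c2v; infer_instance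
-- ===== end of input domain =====

-- B replaces A's accumulate-while loop by a two-phase decomposition (span of code[st:] via lstrip, then int(bits,2) decode);
-- on negative st A's indexing wraps past the end of the string (see D_c2v) while B parses only the suffix code[st:].

-- ===== PORT A =====
-- A's while loop; `cur`/`val` are the loop state.  `fuel` only makes the recursion structural: it starts
-- above the largest possible number of iterations, so the 0 branch is never reached.
-- Indexing is Python's: negative index wraps; pyGet? = none is Python's IndexError (excluded by Pre_c2v).
def c2vLoop (code : List Char) (fuel : Nat) (st cur val : Int) : Int × Int :=
  match fuel with
  | 0 => (val, st + cur + 1)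
  | fuel + 1 =>
    if st + cur < (code.length : Int) then
      match PySem.List.pyGet? code (st + cur) with
      | none => (val, st + cur + 1)   -- Python raises IndexError here; outside Pre_c2v
      | some c =>
        if c = '\t' then c2vLoop code fuel st (cur + 1) (val * 2 + 1)
        else if c = ' ' then c2vLoop code fuel st (cur + 1) (val * 2)
        else (val, st + cur + 1)
    else (val, st + cur + 1)

def c2v (code : String) (st : Int) : Int × Int :=
  c2vLoop code.toList ((((code.toList.length : Int)) - st).toNat + 1) st 0 0

-- ===== PORT B =====
-- the character set of lstrip(' \t')
def pvBit (c : Char) : Bool := c = ' ' || c = '\t'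

def c2v_alt (code : String) (st : Int) : Int × Int :=
  let tail := PySem.List.slice code.toList (some st) none          -- code[st:]
  -- run = len(tail) - len(tail.lstrip(' \t')): lstrip(chars) drops the leading run of chars (hand port, exact)
  let run : Int := (tail.length : Int) - ((tail.dropWhile pvBit).length : Int)
  -- tail[:run].replace('\t','1').replace(' ','0'): single-character replace is a per-character map (exact)
  let bits := ((tail.take run.toNat).map (fun c => if c = '\t' then '1' else c)).map
      (fun c => if c = ' ' then '0' else c)
  -- int(bits, 2) if bits else 0: bits has only '0'/'1' (no sign/space/prefix/underscore), so int(bits,2)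
  -- is exactly the binary fold (hand port, exact on this domain)
  let v : Int := if bits = [] then 0 else bits.foldl (fun a c => a * 2 + (if c = '1' then 1 else 0)) 0
  (v, st + run + 1)

-- ===== PRECONDITION & SPEC =====
-- A raises IndexError iff its first access code[st] is out of range below, i.e. st < -len(code).
def Pre_c2v (code : String) (st : Int) : Prop := -(code.toList.length : Int) ≤ st
instance (code : String) (st : Int) : Decidable (Pre_c2v code st) := by unfold Pre_c2v; infer_instance
def pvWitness_c2v : String × Int := (" \t>x", 0)

-- On st < 0 where the last |st| characters of code are all ' '/'\t' and the first character of code is ' '/'\t',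
-- A's negative indexing wraps past the end and keeps accumulating from the START of the string (e.g. (" ", -1) ↦ (0, 2)),
-- while B parses only the run inside code[st:] and returns its value with end position st+run+1 (e.g. (0, 1)) —
-- the intended "parse the run starting at st" result.
def D_c2v (code : String) (st : Int) : Prop :=
  st < 0 ∧ code.toList.drop ((code.toList.length : Int) + st).toNat ⊆ [' ', '\t']
    ∧ code.toList.headD '.' ∈ [' ', '\t']
instance (code : String) (st : Int) : Decidable (D_c2v code st) := by unfold D_c2v; infer_instance

def Spec_c2v (code : String) (st : Int) (out : Int × Int) : Prop := ¬ D_c2v code st → out = c2v_alt code st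
instance (code : String) (st : Int) (out : Int × Int) : Decidable (Spec_c2v code st out) := by
  unfold Spec_c2v; infer_instance

def pvDiffWitness_c2v : String × Int := (" ", -1)
def pvDiffWitnessOut_c2v : (Int × Int) × (Int × Int) := ((0, 2), (0, 1))

-- ===== CLAIM (what is proved, stated in full; the proofs are below) =====
def Claim_unchanged_c2v : Prop := ∀ (code : String) (st : Int), Dom_c2v code st → Pre_c2v code st → Spec_c2v code st (c2v code st)
def Claim_changed_c2v : Prop := Dom_c2v (pvDiffWitness_c2v.1) (pvDiffWitness_c2v.2) ∧ Pre_c2v (pvDiffWitness_c2v.1) (pvDiffWitness_c2v.2) ∧ D_c2v (pvDiffWitness_c2v.1) (pvDiffWitness_c2v.2) ∧ c2v (pvDiffWitness_c2v.1) (pvDiffWitness_c2v.2) = pvDiffWitnessOut_c2v.1 ∧ c2v_alt (pvDiffWitness_c2v.1) (pvDiffWitness_c2v.2) = pvDiffWitnessOut_c2v.2 ∧ pvDiffWitnessOut_c2v.1 ≠ pvDiffWitnessOut_c2v.2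
def Claim_exact_c2v : Prop := ∀ (code : String) (st : Int), Dom_c2v code st → Pre_c2v code st → D_c2v code st → c2v code st ≠ c2v_alt code st

-- ===== LEMMAS AND PROOFS =====

-- the value accumulated by scanning a run of bit characters, starting from v
def pvVal (v : Int) (l : List Char) : Int := l.foldl (fun a c => a * 2 + (if c = '\t' then 1 else 0)) v

theorem pvVal_cons (v : Int) (c : Char) (l : List Char) :
    pvVal v (c :: l) = pvVal (v * 2 + (if c = '\t' then 1 else 0)) l := rfl

theorem subset_all_bit (l : List Char) : l ⊆ [' ', '\t'] ↔ l.all pvBit = true := by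
  simp [List.subset_def, List.all_eq_true, pvBit]

theorem mem_pair_bit (c : Char) : c ∈ [' ', '\t'] ↔ pvBit c = true := by
  simp [pvBit]

theorem c2vLoop_stop (code : List Char) (fuel : Nat) (st cur val : Int)
    (h : ¬ st + cur < (code.length : Int)) :
    c2vLoop code (fuel + 1) st cur val = (val, st + cur + 1) := by
  simp [c2vLoop, h]

theorem c2vLoop_step (code : List Char) (fuel : Nat) (st cur val : Int) (c : Char)
    (h : st + cur < (code.length : Int)) (hc : PySem.List.pyGet? code (st + cur) = some c) :
    c2vLoop code (fuel + 1) st cur val =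
      if c = '\t' then c2vLoop code fuel st (cur + 1) (val * 2 + 1)
      else if c = ' ' then c2vLoop code fuel st (cur + 1) (val * 2)
      else (val, st + cur + 1) := by
  simp [c2vLoop, h, hc]

theorem pyGet?_neg_in (code : List Char) (i : Int) (j : Nat) (h0 : i < 0)
    (h1 : -(code.length : Int) ≤ i) (hj : (code.length : Int) + i = (j : Int)) :
    PySem.List.pyGet? code i = code[j]? := by
  have h2 : ¬ (0 ≤ i) := by omega
  have h3 : code.length - (-i).toNat = j := by omega
  simp [PySem.List.pyGet?, PySem.List.pyIdx?, h2, h1, h3]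

theorem takeWhile_all_eq_self {α : Type} (p : α → Bool) (l : List α) (h : l.all p = true) :
    l.takeWhile p = l := by
  induction l with
  | nil => rfl
  | cons x t ih =>
    simp only [List.all_cons, Bool.and_eq_true] at h
    simp [h.1, ih h.2]

-- A's loop in the in-range regime (0 ≤ st+cur): it scans the leading bit run of code[st+cur:]
theorem loopA_nonneg (fuel : Nat) : ∀ (code : List Char) (st cur val : Int), 0 ≤ st + cur →
    ((code.length : Int) - (st + cur)).toNat < fuel →
    c2vLoop code fuel st cur val =
      (pvVal val ((code.drop (st + cur).toNat).takeWhile pvBit),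
       st + cur + ((((code.drop (st + cur).toNat).takeWhile pvBit).length : Int)) + 1) := by
  induction fuel with
  | zero => intro code st cur val h0 hf; omega
  | succ n ih =>
    intro code st cur val h0 hf
    by_cases h : st + cur < (code.length : Int)
    · have hlt : (st + cur).toNat < code.length := by omega
      have hget : PySem.List.pyGet? code (st + cur) = some (code[(st + cur).toNat]) := by
        rw [PySem.List.pyGet?_of_nonneg code h0, List.getElem?_eq_getElem hlt]
      rw [c2vLoop_step code n st cur val _ h hget]
      have hdrop : code.drop (st + cur).toNat = code[(st + cur).toNat] :: code.drop ((st + cur).toNat + 1) :=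
        List.drop_eq_getElem_cons hlt
      have hnat : (st + (cur + 1)).toNat = (st + cur).toNat + 1 := by omega
      have hrec : ∀ v : Int, c2vLoop code n st (cur + 1) v =
          (pvVal v ((code.drop ((st + cur).toNat + 1)).takeWhile pvBit),
           st + cur + 1 + ((((code.drop ((st + cur).toNat + 1)).takeWhile pvBit).length : Int)) + 1) := by
        intro v
        have := ih code st (cur + 1) v (by omega) (by omega)
        rw [hnat] at this
        rw [this]; ring_nf
      by_cases ht : code[(st + cur).toNat] = '\t'
      · rw [if_pos ht, hrec, hdrop]
        have hbit : pvBit (code[(st + cur).toNat]) = true := by simp [pvBit, ht]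
        rw [List.takeWhile_cons_of_pos hbit, pvVal_cons, ht]
        simp only [List.length_cons, Prod.mk.injEq]
        refine ⟨by simp, by push_cast; ring⟩
      · by_cases hs : code[(st + cur).toNat] = ' '
        · rw [if_neg ht, if_pos hs, hrec, hdrop]
          have hbit : pvBit (code[(st + cur).toNat]) = true := by simp [pvBit, hs]
          rw [List.takeWhile_cons_of_pos hbit, pvVal_cons, hs]
          simp only [List.length_cons, Prod.mk.injEq]
          refine ⟨by rw [if_neg (by decide), add_zero], by push_cast; ring⟩
        · rw [if_neg ht, if_neg hs, hdrop]
          have hbit : pvBit (code[(st + cur).toNat]) = false := by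
            simp [pvBit]; exact ⟨hs, ht⟩
          rw [List.takeWhile_cons_of_neg (by simp [hbit])]
          simp [pvVal]
    · rw [c2vLoop_stop code n st cur val h]
      have : code.drop (st + cur).toNat = [] := List.drop_eq_nil_of_le (by omega)
      rw [this]
      simp [pvVal]

-- A's loop in the wrapped regime (st+cur < 0): it scans the last -(st+cur) characters of code;
-- if they are all bits it continues at index 0 (cur = -st) with the accumulated value
theorem loopA_neg (k : Nat) : ∀ (code : List Char) (st cur val : Int) (fuel : Nat),
    st + cur < 0 → 0 ≤ (code.length : Int) + (st + cur) → -(st + cur) = (k : Int) → k ≤ fuel →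
    c2vLoop code fuel st cur val =
      (if ((code.drop ((code.length : Int) + (st + cur)).toNat).all pvBit) = true then
        c2vLoop code (fuel - k) st (-st) (pvVal val (code.drop ((code.length : Int) + (st + cur)).toNat))
      else
        (pvVal val ((code.drop ((code.length : Int) + (st + cur)).toNat).takeWhile pvBit),
         st + cur + ((((code.drop ((code.length : Int) + (st + cur)).toNat).takeWhile pvBit).length : Int)) + 1)) := by
  induction k with
  | zero => intro code st cur val fuel h0 h1 hk hf; omega
  | succ m ih =>
    intro code st cur val fuel h0 h1 hk hf
    obtain ⟨f, rfl⟩ : ∃ f, fuel = f + 1 := ⟨fuel - 1, by omega⟩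
    have h : st + cur < (code.length : Int) := by omega
    have hjlt : (((code.length : Int) + (st + cur)).toNat) < code.length := by omega
    have hget : PySem.List.pyGet? code (st + cur) = some (code[(((code.length : Int) + (st + cur)).toNat)]) := by
      rw [pyGet?_neg_in code (st + cur) (((code.length : Int) + (st + cur)).toNat) h0 (by omega) (by omega)]
      exact List.getElem?_eq_getElem hjlt
    set j := (((code.length : Int) + (st + cur)).toNat) with hjdef
    set c := code[j] with hcdef
    rw [c2vLoop_step code f st cur val c h hget]
    have hdrop : code.drop j = c :: code.drop (j + 1) := List.drop_eq_getElem_cons hjlt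
    have hnat : (((code.length : Int) + (st + (cur + 1))).toNat) = j + 1 := by omega
    have hrec : ∀ v : Int, pvBit c = true → c2vLoop code f st (cur + 1) v =
        (if ((code.drop (j + 1)).all pvBit) = true then
          c2vLoop code (f - m) st (-st) (pvVal v (code.drop (j + 1)))
        else
          (pvVal v ((code.drop (j + 1)).takeWhile pvBit),
           st + (cur + 1) + ((((code.drop (j + 1)).takeWhile pvBit).length : Int)) + 1)) := by
      intro v hbit
      by_cases hz : st + (cur + 1) < 0
      · have := ih code st (cur + 1) v f hz (by omega) (by omega) (by omega)
        rw [hnat] at this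
        exact this
      · -- st + cur + 1 = 0: the wrapped part is exhausted, drop (j+1) = [] and cur + 1 = -st
        have hcur : cur + 1 = -st := by omega
        have hj1 : j + 1 = code.length := by omega
        have hnil : code.drop (j + 1) = [] := by rw [hj1]; simp
        rw [hnil]
        simp only [List.all_nil]
        rw [hcur]
        have : f - m = f := by omega
        rw [this]
        rfl
      -- (the `hbit` hypothesis is unused above; kept for symmetry of the statement)
    by_cases ht : c = '\t'
    · rw [if_pos ht]
      have hbit : pvBit c = true := by simp [pvBit, ht]
      rw [hrec _ hbit, hdrop]
      simp only [List.all_cons, hbit, Bool.true_and]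
      by_cases hall : ((code.drop (j + 1)).all pvBit) = true
      · rw [if_pos hall, if_pos hall, pvVal_cons]
        have : f + 1 - (m + 1) = f - m := by omega
        rw [this, ht]; simp
      · rw [if_neg hall, if_neg hall]
        rw [List.takeWhile_cons_of_pos hbit, pvVal_cons, ht]
        simp only [List.length_cons, Prod.mk.injEq]
        refine ⟨by simp, by push_cast; ring⟩
    · by_cases hs : c = ' '
      · rw [if_neg ht, if_pos hs]
        have hbit : pvBit c = true := by simp [pvBit, hs]
        rw [hrec _ hbit, hdrop]
        simp only [List.all_cons, hbit, Bool.true_and]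
        by_cases hall : ((code.drop (j + 1)).all pvBit) = true
        · rw [if_pos hall, if_pos hall, pvVal_cons]
          have : f + 1 - (m + 1) = f - m := by omega
          rw [this, hs, if_neg (by decide), add_zero]
        · rw [if_neg hall, if_neg hall]
          rw [List.takeWhile_cons_of_pos hbit, pvVal_cons, hs]
          simp only [List.length_cons, Prod.mk.injEq]
          refine ⟨by rw [if_neg (by decide), add_zero], by push_cast; ring⟩
      · rw [if_neg ht, if_neg hs, hdrop]
        have hbit : pvBit c = false := by simp [pvBit]; exact ⟨hs, ht⟩
        simp only [List.all_cons, hbit, Bool.false_and]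
        rw [if_neg (by simp)]
        rw [List.takeWhile_cons_of_neg (by simp [hbit])]
        simp [pvVal]

-- B in canonical form: the value and length of the leading bit run of code[st:]
theorem alt_eq (code : String) (st : Int) :
    c2v_alt code st =
      (pvVal 0 ((PySem.List.slice code.toList (some st) none).takeWhile pvBit),
       st + ((((PySem.List.slice code.toList (some st) none).takeWhile pvBit).length : Int)) + 1) := by
  unfold c2v_alt
  dsimp only
  set tail := PySem.List.slice code.toList (some st) none with htail
  have hlen := congrArg List.length (List.takeWhile_append_dropWhile (p := pvBit) (l := tail))
  rw [List.length_append] at hlen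
  have hrun : (tail.length : Int) - ((tail.dropWhile pvBit).length : Int) = (((tail.takeWhile pvBit).length : Int)) := by
    omega
  rw [hrun]
  have htoNat : ((((tail.takeWhile pvBit).length : Int))).toNat = (tail.takeWhile pvBit).length := by omega
  rw [htoNat]
  have htake : tail.take ((tail.takeWhile pvBit).length) = tail.takeWhile pvBit := by
    obtain ⟨t, hteq⟩ := List.takeWhile_prefix (l := tail) pvBit
    set tw := tail.takeWhile pvBit with htw
    rw [← hteq]
    exact List.take_left
  rw [htake]
  by_cases hnil : tail.takeWhile pvBit = []
  · simp [hnil, pvVal]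
  · rw [if_neg (by simp [hnil])]
    simp only [List.foldl_map]
    have : ∀ (a : Int) (c : Char), c ∈ tail.takeWhile pvBit →
        (fun (a : Int) (c : Char) => a * 2 +
            (if (if (if c = '\t' then '1' else c) = ' ' then '0' else if c = '\t' then '1' else c) = '1' then (1:Int) else 0)) a c =
        (fun (a : Int) (c : Char) => a * 2 + (if c = '\t' then 1 else 0)) a c := by
      intro a c hc
      have hb : pvBit c = true := List.mem_takeWhile_imp hc
      simp only [pvBit, Bool.or_eq_true, decide_eq_true_eq] at hb
      rcases hb with hsp | htb
      · subst hsp; simp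
      · subst htb; simp
    simp only [Prod.mk.injEq]
    refine ⟨?_, trivial⟩
    simp only [pvVal]
    exact PySem.List.foldl_congr_mem _ _ _ 0 this

theorem clamp_neg (n : Nat) (st : Int) (h0 : st < 0) (h1 : -(n : Int) ≤ st) :
    PySem.List.clampIdx n st = ((n : Int) + st).toNat := by
  simp only [PySem.List.clampIdx, if_pos h0]
  split <;> omega

-- ===== VERDICT (by name: the statement is the Claim_ definition above) =====
theorem c2v_spec : Claim_unchanged_c2v := by
  intro code st _ hPre hnd
  unfold Pre_c2v at hPre
  unfold c2v
  rcases (by omega : 0 ≤ st ∨ st < 0) with hst | hst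
  · -- non-negative start: both sides scan the leading bit run of code[st:]
    have := loopA_nonneg ((((code.toList.length : Int)) - st).toNat + 1) code.toList st 0 0
      (by omega) (by omega)
    simp only [add_zero] at this
    rw [this, alt_eq, PySem.List.slice_from code.toList hst]
  · -- negative start: A scans the suffix code[len+st:]; ¬D_c2v rules out wrapping past it with effect
    have hn : 0 < code.toList.length := by omega
    have hneg := loopA_neg (-st).toNat code.toList st 0 0
      ((((code.toList.length : Int)) - st).toNat + 1) (by omega) (by omega) (by omega) (by omega)
    simp only [add_zero] at hneg
    set s := code.toList.drop (((code.toList.length : Int) + st).toNat) with hsdef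
    have hslice : PySem.List.slice code.toList (some st) none = s := by
      rw [PySem.List.slice_some_none, clamp_neg _ st hst hPre]
    by_cases hall : s.all pvBit = true
    · -- the whole suffix is bits; since ¬D, code[0] is not a bit, so the wrapped scan adds nothing
      rw [hneg, if_pos hall]
      have hhead : pvBit (code.toList.headD '.') = false := by
        unfold D_c2v at hnd
        rcases Bool.eq_false_or_eq_true (pvBit (code.toList.headD '.')) with ht | hf
        · exact absurd ⟨hst, (subset_all_bit _).2 hall, (mem_pair_bit _).2 ht⟩ hnd
        · exact hf
      obtain ⟨c0, rest, hcode⟩ : ∃ c0 rest, code.toList = c0 :: rest := by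
        cases hc : code.toList with
        | nil => rw [hc] at hn; simp at hn
        | cons a l => exact ⟨a, l, rfl⟩
      have hfuel : ((((code.toList.length : Int)) - st).toNat + 1) - (-st).toNat = code.toList.length + 1 := by
        omega
      rw [hfuel]
      have := loopA_nonneg (code.toList.length + 1) code.toList st (-st) (pvVal 0 s)
        (by omega) (by omega)
      have hstz : st + -st = 0 := by omega
      rw [hstz] at this
      rw [this]
      have hd0 : code.toList.drop (0 : Int).toNat = code.toList := by simp
      rw [hd0, hcode]
      have hc0 : pvBit c0 = false := by
        rw [hcode] at hhead; simpa using hhead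
      rw [List.takeWhile_cons_of_neg (by simp [hc0])]
      rw [alt_eq, hslice]
      rw [takeWhile_all_eq_self pvBit s hall]
      have hslen : (s.length : Int) = -st := by
        have : s.length = code.toList.length - (((code.toList.length : Int) + st).toNat) := by
          rw [hsdef]; simp
        omega
      simp only [List.length_nil, Prod.mk.injEq]
      refine ⟨rfl, by push_cast; omega⟩
    · -- the suffix contains a non-bit: both sides scan its leading bit run
      rw [hneg, if_neg hall, alt_eq, hslice]

set_option maxRecDepth 8192 in
theorem c2v_changed : Claim_changed_c2v := by
  unfold Claim_changed_c2v; decide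

theorem c2v_tight : Claim_exact_c2v := by
  intro code st _ hPre hD
  unfold Pre_c2v at hPre
  obtain ⟨hst, hallP, hheadP⟩ := hD
  have hn : 0 < code.toList.length := by omega
  unfold c2v
  have hneg := loopA_neg (-st).toNat code.toList st 0 0
    ((((code.toList.length : Int)) - st).toNat + 1) (by omega) (by omega) (by omega) (by omega)
  simp only [add_zero] at hneg
  set s := code.toList.drop (((code.toList.length : Int) + st).toNat) with hsdef
  have hall : s.all pvBit = true := (subset_all_bit _).1 hallP
  have hhead : pvBit (code.toList.headD '.') = true := (mem_pair_bit _).1 hheadP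
  rw [hneg, if_pos hall]
  have hfuel : ((((code.toList.length : Int)) - st).toNat + 1) - (-st).toNat = code.toList.length + 1 := by
    omega
  rw [hfuel]
  have hA := loopA_nonneg (code.toList.length + 1) code.toList st (-st) (pvVal 0 s)
    (by omega) (by omega)
  have hstz : st + -st = 0 := by omega
  rw [hstz] at hA
  rw [hA]
  obtain ⟨c0, rest, hcode⟩ : ∃ c0 rest, code.toList = c0 :: rest := by
    cases hc : code.toList with
    | nil => rw [hc] at hn; simp at hn
    | cons a l => exact ⟨a, l, rfl⟩
  have hd0 : code.toList.drop (0 : Int).toNat = code.toList := by simp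
  rw [hd0, hcode]
  have hc0 : pvBit c0 = true := by rw [hcode] at hhead; simpa using hhead
  rw [List.takeWhile_cons_of_pos hc0]
  rw [alt_eq]
  have hslice : PySem.List.slice code.toList (some st) none = s := by
    rw [PySem.List.slice_some_none, clamp_neg _ st hst hPre]
  rw [hslice, takeWhile_all_eq_self pvBit s hall]
  have hslen : (s.length : Int) = -st := by
    have : s.length = code.toList.length - (((code.toList.length : Int) + st).toNat) := by
      rw [hsdef]; simp
    omega
  -- A's second component is ≥ 2 while B's is st + (-st) + 1 = 1
  intro heq
  have h2 := congrArg Prod.snd heq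
  simp only [List.length_cons] at h2
  push_cast at h2
  omega
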